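-- pv_equiv track=rewrite | github.com/cassadymh/CloneResolumeDMXShortcuts | CloneResolumeDMXShortcuts.py | compute_clone_positions
-- ===== SOURCE A (Python) =====
-- LOW_MASK = (1 << 18) - 1
--
-- CH_MASK  = 0x1FF
--
-- def decode_key(k: int):
--     base = k & ~LOW_MASK
--     analog = (k >> 17) & 1
--     lum = ((k >> 9) & 0xFF) + 1
--     ch = (k & CH_MASK) + 1
--     return base, lum, analog, ch
--
-- def collect_layer_width(blocks):
--     min_slot = 512
--     max_slot = 1
--     for _, blk, _, key, _ in blocks:
--         base, lum, analog, ch = decode_key(key)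
--         if analog == 1 and ch < 512:
--             max_slot = max(max_slot, ch + 1)
--         else:
--             max_slot = max(max_slot, ch)
--         min_slot = min(min_slot, ch)
--     return max(min_slot,1), max_slot
--
-- def compute_clone_positions(blocks, total_layers, layer_width, src_layer, lum0):
--     """Return list of (target_layer, target_lum, group_idx) for each clone i=1..(layers-1)."""
--     def would_overflow(gidx: int) -> bool:
--         for _, blk, _, key, _ in blocks:
--             base, lum, analog, ch0 = decode_key(key)
--             width = 2 if analog == 1 else 1
--             desired = (ch0 - 1) + gidx * layer_width + 1
--             if desired + width - 1 > 512:
--                 return True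
--         return False
--
--     plan = []
--     current_lum = lum0
--     # Determine where the source layer sits within its lumiverse block grid
--     min_slot, _ = collect_layer_width(blocks)
--     start_block_idx = (min_slot - 1) // layer_width
--     gidx = start_block_idx + 1  # first clone begins after source block
--     clones_needed = total_layers - 1
--     for i in range(1, clones_needed + 1):
--         if would_overflow(gidx):
--             current_lum += 1
--             gidx = 0
--         target_layer = src_layer + i
--         plan.append((target_layer, current_lum, gidx))
--         gidx += 1
--     return plan
-- ===== SOURCE B (Python) =====
-- def compute_clone_positions(blocks, total_layers, layer_width, src_layer, lum0):
--     """Return list of (target_layer, target_lum, group_idx) for each clone i=1..(layers-1)."""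
--     def chan(key):
--         ch0 = (key & 0x1FF) + 1
--         width = 2 if (key >> 17) & 1 else 1
--         return ch0, width
--
--     slots = [chan(b[3]) for b in blocks]
--     min_slot = min((c for c, _ in slots), default=512)
--     # a group index gidx overflows channel 512 exactly when gidx * layer_width > slack
--     slack = min((513 - w - c for c, w in slots), default=None)
--
--     plan = []
--     lum = lum0
--     gidx = (min_slot - 1) // layer_width + 1
--     for i in range(1, total_layers):
--         if slack is not None and gidx * layer_width > slack:
--             lum += 1
--             gidx = 0
--         plan.append((src_layer + i, lum, gidx))
--         gidx += 1
--     return plan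
-- ===== Notes on version B (the rewrite author's own statement) =====
-- stated objective: faster
-- what changed: A rescans and re-decodes every block per clone inside would_overflow; B precomputes the channel layout and the single minimum slack once, so the per-clone overflow test becomes one integer comparison and the inner scan disappears. Pre_ excludes only layer_width = 0, where both implementations raise ZeroDivisionError.
import Mathlib
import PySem

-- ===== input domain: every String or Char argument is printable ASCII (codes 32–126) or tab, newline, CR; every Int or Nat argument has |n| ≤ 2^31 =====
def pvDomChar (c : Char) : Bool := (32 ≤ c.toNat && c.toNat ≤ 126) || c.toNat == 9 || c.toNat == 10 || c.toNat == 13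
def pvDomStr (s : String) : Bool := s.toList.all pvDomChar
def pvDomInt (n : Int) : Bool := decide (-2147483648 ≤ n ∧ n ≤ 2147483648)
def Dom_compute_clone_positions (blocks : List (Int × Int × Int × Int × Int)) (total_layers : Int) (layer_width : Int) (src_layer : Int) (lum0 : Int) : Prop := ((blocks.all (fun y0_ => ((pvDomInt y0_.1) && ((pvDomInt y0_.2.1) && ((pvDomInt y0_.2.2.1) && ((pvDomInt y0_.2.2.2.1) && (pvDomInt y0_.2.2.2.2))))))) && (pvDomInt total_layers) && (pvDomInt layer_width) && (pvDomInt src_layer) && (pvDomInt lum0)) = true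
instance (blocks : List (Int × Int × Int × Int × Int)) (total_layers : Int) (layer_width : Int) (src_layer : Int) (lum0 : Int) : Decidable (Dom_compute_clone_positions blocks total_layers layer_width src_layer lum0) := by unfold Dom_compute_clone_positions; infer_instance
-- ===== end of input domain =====

-- B precomputes the channel layout and the single minimum slack once, so the per-clone
-- overflow test is one comparison instead of A's rescan of all blocks (objective: faster).

-- ===== PORT A =====
-- decode_key(k): bit fields of a DMX shortcut key (LOW_MASK = 2^18-1 = 262143, CH_MASK = 0x1FF = 511)
def decode_key (k : Int) : Int × Int × Int × Int :=
  let base := PySem.Int.band k (Int.not 262143)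
  let analog := PySem.Int.band (k >>> 17) 1
  let lum := PySem.Int.band (k >>> 9) 255 + 1
  let ch := PySem.Int.band k 511 + 1
  (base, lum, analog, ch)

-- collect_layer_width(blocks)
def collect_layer_width (blocks : List (Int × Int × Int × Int × Int)) : Int × Int :=
  let p := blocks.foldl (fun (acc : Int × Int) b =>
    let d := decode_key b.2.2.2.1
    let analog := d.2.2.1
    let ch := d.2.2.2
    let max_slot := if analog = 1 ∧ ch < 512 then max acc.2 (ch + 1) else max acc.2 ch
    (min acc.1 ch, max_slot)) (512, 1)
  (max p.1 1, p.2)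

-- would_overflow(gidx): the inner loop with early return, as structural recursion
def would_overflow (blocks : List (Int × Int × Int × Int × Int)) (layer_width gidx : Int) : Bool :=
  match blocks with
  | [] => false
  | b :: rest =>
    let d := decode_key b.2.2.2.1
    let analog := d.2.2.1
    let ch0 := d.2.2.2
    let width : Int := if analog = 1 then 2 else 1
    let desired := (ch0 - 1) + gidx * layer_width + 1
    if desired + width - 1 > 512 then true else would_overflow rest layer_width gidx

def compute_clone_positions (blocks : List (Int × Int × Int × Int × Int)) (total_layers : Int) (layer_width : Int) (src_layer : Int) (lum0 : Int) : List (Int × Int × Int) :=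
  let min_slot := (collect_layer_width blocks).1
  let start_block_idx := PySem.Int.floordiv (min_slot - 1) layer_width
  let clones_needed := total_layers - 1
  let res := (PySem.List.pyRange 1 (clones_needed + 1) 1).foldl
    (fun (acc : List (Int × Int × Int) × Int × Int) i =>
      let lum := if would_overflow blocks layer_width acc.2.2 then acc.2.1 + 1 else acc.2.1
      let g := if would_overflow blocks layer_width acc.2.2 then 0 else acc.2.2
      (acc.1 ++ [(src_layer + i, lum, g)], lum, g + 1))
    ([], lum0, start_block_idx + 1)
  res.1

-- ===== PORT B =====
-- chan(key): (channel, width) of a block key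
def pvChan (key : Int) : Int × Int :=
  let ch0 := PySem.Int.band key 511 + 1
  let width : Int := if PySem.Int.band (key >>> 17) 1 = 1 then 2 else 1
  (ch0, width)

def compute_clone_positions_alt (blocks : List (Int × Int × Int × Int × Int)) (total_layers : Int) (layer_width : Int) (src_layer : Int) (lum0 : Int) : List (Int × Int × Int) :=
  let slots := blocks.map (fun b => pvChan b.2.2.2.1)
  let min_slot := PySem.List.minD (slots.map (fun p => p.1)) (fun x => x) 512
  -- a group index gidx overflows channel 512 exactly when gidx * layer_width > slack
  let slack := PySem.List.min? (slots.map (fun p => 513 - p.2 - p.1)) (fun x => x)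
  let res := (PySem.List.pyRange 1 total_layers 1).foldl
    (fun (acc : List (Int × Int × Int) × Int × Int) i =>
      let ov : Bool := match slack with
        | none => false
        | some m => decide (acc.2.2 * layer_width > m)
      let lum := if ov then acc.2.1 + 1 else acc.2.1
      let g := if ov then 0 else acc.2.2
      (acc.1 ++ [(src_layer + i, lum, g)], lum, g + 1))
    ([], lum0, PySem.Int.floordiv (min_slot - 1) layer_width + 1)
  res.1

-- ===== PRECONDITION & SPEC =====
-- Pre_ excludes only layer_width = 0, where A raises ZeroDivisionError ((min_slot - 1) // layer_width).
def Pre_compute_clone_positions (blocks : List (Int × Int × Int × Int × Int)) (total_layers : Int) (layer_width : Int) (src_layer : Int) (lum0 : Int) : Prop := layer_width ≠ 0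
instance (blocks : List (Int × Int × Int × Int × Int)) (total_layers : Int) (layer_width : Int) (src_layer : Int) (lum0 : Int) : Decidable (Pre_compute_clone_positions blocks total_layers layer_width src_layer lum0) := by unfold Pre_compute_clone_positions; infer_instance

def pvWitness_compute_clone_positions : (List (Int × Int × Int × Int × Int)) × Int × Int × Int × Int := ([(1, 1, 1, 5, 1), (2, 2, 2, 200, 2)], 6, 2, 3, 1)

def Spec_compute_clone_positions (blocks : List (Int × Int × Int × Int × Int)) (total_layers : Int) (layer_width : Int) (src_layer : Int) (lum0 : Int) (out : List (Int × Int × Int)) : Prop := out = compute_clone_positions_alt blocks total_layers layer_width src_layer lum0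
instance (blocks : List (Int × Int × Int × Int × Int)) (total_layers : Int) (layer_width : Int) (src_layer : Int) (lum0 : Int) (out : List (Int × Int × Int)) : Decidable (Spec_compute_clone_positions blocks total_layers layer_width src_layer lum0 out) := by unfold Spec_compute_clone_positions; infer_instance

-- ===== CLAIM =====
def Claim_equal_compute_clone_positions : Prop := ∀ (blocks : List (Int × Int × Int × Int × Int)) (total_layers : Int) (layer_width : Int) (src_layer : Int) (lum0 : Int), Dom_compute_clone_positions blocks total_layers layer_width src_layer lum0 → Pre_compute_clone_positions blocks total_layers layer_width src_layer lum0 → Spec_compute_clone_positions blocks total_layers layer_width src_layer lum0 (compute_clone_positions blocks total_layers layer_width src_layer lum0)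

-- ===== LEMMAS AND PROOFS =====

-- slack of one block, the value B's min ranges over
def pvSlack (key : Int) : Int := 513 - (pvChan key).2 - (pvChan key).1

-- A's overflow test on a cons, phrased through the slack of the head block
theorem ov_cons (b : Int × Int × Int × Int × Int) (rest : List (Int × Int × Int × Int × Int)) (lw g : Int) :
    would_overflow (b :: rest) lw g = (decide (pvSlack b.2.2.2.1 < g * lw) || would_overflow rest lw g) := by
  have hcond : ((decode_key b.2.2.2.1).2.2.2 - 1 + g * lw + 1 +
      (if (decode_key b.2.2.2.1).2.2.1 = 1 then (2:Int) else 1) - 1 > 512) ↔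
      pvSlack b.2.2.2.1 < g * lw := by
    unfold pvSlack pvChan decode_key
    simp only []
    split_ifs <;> omega
  simp only [would_overflow]
  by_cases hc : pvSlack b.2.2.2.1 < g * lw
  · rw [if_pos (hcond.mpr hc)]; simp [hc]
  · rw [if_neg (fun hh => hc (hcond.mp hh))]; simp [hc]

-- A's early-return scan equals "running min of slacks < g*lw"
theorem overflow_iff_min (lw g : Int) :
    ∀ (l : List (Int × Int × Int × Int × Int)) (a : Int),
    ((l.map (fun b' => pvSlack b'.2.2.2.1)).foldl min a < g * lw ↔
      (a < g * lw ∨ would_overflow l lw g = true)) := by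
  intro l
  induction l with
  | nil => intro a; simp [would_overflow]
  | cons b rest ih =>
    intro a
    simp only [List.map_cons, List.foldl_cons]
    rw [ih, min_lt_iff, ov_cons]
    simp only [Bool.or_eq_true, decide_eq_true_eq]
    tauto

-- the two overflow tests agree on every group index
theorem ov_char (blocks : List (Int × Int × Int × Int × Int)) (lw g : Int) :
    would_overflow blocks lw g =
      (match PySem.List.min? (blocks.map (fun b => pvSlack b.2.2.2.1)) (fun x => x) with
        | none => false
        | some m => decide (g * lw > m)) := by
  cases blocks with
  | nil => rfl
  | cons b rest =>
    simp only [List.map_cons, PySem.List.min?_id_cons]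
    rw [Bool.eq_iff_iff]
    simp only [decide_eq_true_eq, gt_iff_lt]
    rw [show (rest.map (fun b' => pvSlack b'.2.2.2.1)).foldl min (pvSlack b.2.2.2.1) < g * lw ↔
        (pvSlack b.2.2.2.1 < g * lw ∨ would_overflow rest lw g = true) from
      overflow_iff_min lw g rest (pvSlack b.2.2.2.1)]
    rw [ov_cons]
    simp

-- A's running-min of channels equals B's minD over the channel list
theorem fst_collect (blocks : List (Int × Int × Int × Int × Int)) :
    ∀ (a c : Int),
    (blocks.foldl (fun (acc : Int × Int) b =>
      let d := decode_key b.2.2.2.1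
      let analog := d.2.2.1
      let ch := d.2.2.2
      let max_slot := if analog = 1 ∧ ch < 512 then max acc.2 (ch + 1) else max acc.2 ch
      (min acc.1 ch, max_slot)) (a, c)).1
      = (blocks.map (fun b => (pvChan b.2.2.2.1).1)).foldl min a := by
  induction blocks with
  | nil => intro a c; rfl
  | cons b rest ih =>
    intro a c
    simp only [List.foldl_cons, List.map_cons]
    rw [ih]
    rfl

theorem band511_bounds (k : Int) : 0 ≤ PySem.Int.band k 511 ∧ PySem.Int.band k 511 ≤ 511 := by
  constructor
  · rw [PySem.Int.band_comm]; exact PySem.Int.band_nonneg_of_nonneg_left k (by norm_num)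
  · cases k with
    | ofNat n =>
        simp [PySem.Int.band]
        have : n &&& 511 ≤ 511 := Nat.and_le_right
        omega
    | negSucc n => simp [PySem.Int.band]

theorem le_foldl_min (l : List Int) : ∀ (a c : Int), c ≤ a → (∀ x ∈ l, c ≤ x) → c ≤ l.foldl min a := by
  induction l with
  | nil => intro a c h _; simpa using h
  | cons x xs ih =>
    intro a c ha h
    simp only [List.foldl_cons]
    exact ih _ c (le_min ha (h x (by simp))) (fun y hy => h y (by simp [hy]))

theorem minD_cons_int (xs : List Int) : ∀ (x : Int),
    PySem.List.minD (x :: xs) (fun v => v) 512 = xs.foldl min x := by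
  induction xs with
  | nil => intro x; rfl
  | cons y ys ih =>
    intro x
    have h2 : PySem.List.minD (x :: y :: ys) (fun v => v) 512
        = PySem.List.minD (min x y :: ys) (fun v => v) 512 := by
      simp only [PySem.List.minD, PySem.List.min?, List.foldl_cons]
      congr 2
      split_ifs with h <;> (congr 1; omega)
    rw [h2, ih (min x y)]
    simp [List.foldl_cons]

-- min_slot is computed identically by both sides
theorem min_slot_eq (blocks : List (Int × Int × Int × Int × Int)) :
    (collect_layer_width blocks).1
      = PySem.List.minD ((blocks.map (fun b => pvChan b.2.2.2.1)).map (fun p => p.1)) (fun x => x) 512 := by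
  cases blocks with
  | nil => rfl
  | cons b rest =>
    have hch : ∀ k : Int, 1 ≤ (pvChan k).1 ∧ (pvChan k).1 ≤ 512 := by
      intro k
      have := band511_bounds k
      unfold pvChan
      constructor <;> (simp only []; omega)
    simp only [collect_layer_width]
    rw [fst_collect]
    simp only [List.map_cons, List.foldl_cons, List.map_map, minD_cons_int]
    rw [min_eq_right (hch b.2.2.2.1).2]
    have hge : (1 : Int) ≤ (rest.map (fun b' => (pvChan b'.2.2.2.1).1)).foldl min (pvChan b.2.2.2.1).1 := by
      refine le_foldl_min _ _ _ (hch b.2.2.2.1).1 ?_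
      intro x hx
      rcases List.mem_map.mp hx with ⟨b', _, rfl⟩
      exact (hch b'.2.2.2.1).1
    rw [max_eq_left hge]
    rfl

-- ===== VERDICT =====
theorem compute_clone_positions_spec : Claim_equal_compute_clone_positions := by
  intro blocks total_layers layer_width src_layer lum0 _hdom _hpre
  unfold Spec_compute_clone_positions
  unfold compute_clone_positions compute_clone_positions_alt
  simp only []
  rw [← min_slot_eq]
  have hrange : total_layers - 1 + 1 = total_layers := by ring
  rw [hrange]
  congr 1
  apply PySem.List.foldl_congr_mem
  intro acc i _
  have hov := ov_char blocks layer_width acc.2.2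
  simp only [List.map_map] at *
  rw [hov]
  rfl
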